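-- pv_equiv track=rewrite | github.com/jakobkhansen/KattisSolutions | kemija08/kemija08.py | kemija08
-- ===== SOURCE A (Python) =====
-- def kemija08(lines):
--     vowels = {
--         'a': True,
--         'e': True,
--         'i': True,
--         'o': True,
--         'u': True
--     }
--
--     string = lines[0]
--     newString = ""
--
--     i = 0
--     while i < len(string):
--         newString += string[i]
--         if vowels.get(string[i], False):
--             i += 2
--         i += 1
--
--     return newString
-- ===== SOURCE B (Python) =====
-- import re
--
-- def kemija08(lines):
--     # single regex substitution: each vowel plus up to two following chars
--     # ([\s\S] so newlines are skipped too) collapses to just the vowel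
--     return re.sub(r'[aeiou][\s\S]{0,2}', lambda m: m.group(0)[0], lines[0])
-- ===== Notes on version B (the rewrite author's own statement) =====
-- stated objective: idiomatic
-- what changed: replaced the index-jumping while loop with string concatenation by a single non-overlapping regex substitution that matches each vowel together with up to two following characters and keeps only the vowel
import Mathlib
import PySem

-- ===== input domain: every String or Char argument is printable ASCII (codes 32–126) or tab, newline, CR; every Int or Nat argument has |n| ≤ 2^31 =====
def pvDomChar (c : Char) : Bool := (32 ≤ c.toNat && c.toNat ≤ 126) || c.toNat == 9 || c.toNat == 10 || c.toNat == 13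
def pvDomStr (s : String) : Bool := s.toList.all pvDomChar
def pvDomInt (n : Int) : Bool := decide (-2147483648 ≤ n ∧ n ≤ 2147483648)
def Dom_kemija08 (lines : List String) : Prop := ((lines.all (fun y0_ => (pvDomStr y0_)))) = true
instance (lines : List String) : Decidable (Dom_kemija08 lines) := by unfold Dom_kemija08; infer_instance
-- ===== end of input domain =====

-- B replaces A's index-jumping while loop with string concatenation by a single
-- regex substitution collapsing each vowel plus up to two following characters
-- to just the vowel (idiomatic); equal return value on all non-empty inputs.

-- ===== PORT A =====
-- the 'vowels' dict of A
def kemija08Vowels : PySem.Dict Char Bool :=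
  PySem.Dict.ofList [('a', true), ('e', true), ('i', true), ('o', true), ('u', true)]

-- A's while loop: append string[i], jump i by 3 after a vowel else by 1
def kemija08Loop (s : List Char) (i : Nat) (acc : List Char) : List Char :=
  if h : i < s.length then
    let c := s[i]
    let acc' := acc ++ [c]
    if PySem.Dict.getD kemija08Vowels c false then kemija08Loop s (i + 3) acc'
    else kemija08Loop s (i + 1) acc'
  else acc
termination_by s.length - i

def kemija08 (lines : List String) : String :=
  match PySem.List.pyGet? lines 0 with
  | none => ""                      -- unreachable under Pre_ (A raises IndexError)
  | some s => String.mk (kemija08Loop s.toList 0 [])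

-- ===== PORT B =====
-- B's regex scan: at a vowel, emit it and skip up to the next two characters;
-- any other character is copied unchanged (left-to-right, non-overlapping)
def kemija08Sub : List Char → List Char
  | [] => []
  | c :: rest =>
    if c == 'a' || c == 'e' || c == 'i' || c == 'o' || c == 'u' then
      c :: kemija08Sub (rest.drop 2)
    else
      c :: kemija08Sub rest
termination_by l => l.length
decreasing_by all_goals (simp; try omega)

def kemija08_alt (lines : List String) : String :=
  match PySem.List.pyGet? lines 0 with
  | none => ""
  | some s => String.mk (kemija08Sub s.toList)

-- ===== PRECONDITION & SPEC =====
-- A does lines[0]: on the empty list it raises IndexError, so Pre_ requires a line.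
def Pre_kemija08 (lines : List String) : Prop := lines ≠ []
instance (lines : List String) : Decidable (Pre_kemija08 lines) := by unfold Pre_kemija08; infer_instance
def pvWitness_kemija08 : List String := ["kemija"]

def Spec_kemija08 (lines : List String) (out : String) : Prop := out = kemija08_alt lines
instance (lines : List String) (out : String) : Decidable (Spec_kemija08 lines out) := by unfold Spec_kemija08; infer_instance

-- ===== CLAIM (what is proved, stated in full; the proofs are below) =====
def Claim_equal_kemija08 : Prop := ∀ (lines : List String), Dom_kemija08 lines → Pre_kemija08 lines → Spec_kemija08 lines (kemija08 lines)

-- ===== LEMMAS AND PROOFS =====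

-- A's dict lookup agrees with B's character class
theorem kemija08_vowel_eq (c : Char) :
    PySem.Dict.getD kemija08Vowels c false =
      (c == 'a' || c == 'e' || c == 'i' || c == 'o' || c == 'u') := by
  have hmk : kemija08Vowels =
      PySem.Dict.mk [('a', true), ('e', true), ('i', true), ('o', true), ('u', true)] := by
    decide
  by_cases h1 : c = 'a'
  · subst h1; decide
  by_cases h2 : c = 'e'
  · subst h2; decide
  by_cases h3 : c = 'i'
  · subst h3; decide
  by_cases h4 : c = 'o'
  · subst h4; decide
  by_cases h5 : c = 'u'
  · subst h5; decide
  have g1 : ('a' == c) = false := beq_eq_false_iff_ne.mpr (fun e => h1 e.symm)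
  have g2 : ('e' == c) = false := beq_eq_false_iff_ne.mpr (fun e => h2 e.symm)
  have g3 : ('i' == c) = false := beq_eq_false_iff_ne.mpr (fun e => h3 e.symm)
  have g4 : ('o' == c) = false := beq_eq_false_iff_ne.mpr (fun e => h4 e.symm)
  have g5 : ('u' == c) = false := beq_eq_false_iff_ne.mpr (fun e => h5 e.symm)
  simp [hmk, PySem.Dict.getD, PySem.Dict.get?, List.find?, g1, g2, g3, g4, g5,
    h1, h2, h3, h4, h5]

-- loop invariant: A's loop from index i returns acc ++ B's scan of the suffix
theorem kemija08_loop_eq (s : List Char) (i : Nat) (acc : List Char) :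
    kemija08Loop s i acc = acc ++ kemija08Sub (s.drop i) := by
  by_cases h : i < s.length
  · have hd : s.drop i = s[i] :: s.drop (i + 1) := List.drop_eq_getElem_cons h
    have h2 : (s.drop (i + 1)).drop 2 = s.drop (i + 3) := by
      rw [List.drop_drop]
    rw [kemija08Loop]
    simp only [h, dif_pos, hd, kemija08Sub, kemija08_vowel_eq, h2]
    split
    · rw [kemija08_loop_eq s (i + 3) (acc ++ [s[i]])]
      simp
    · rw [kemija08_loop_eq s (i + 1) (acc ++ [s[i]])]
      simp
  · rw [kemija08Loop]
    simp [h, List.drop_of_length_le (Nat.le_of_not_lt h), kemija08Sub]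
termination_by s.length - i
decreasing_by all_goals omega

-- ===== VERDICT (by name: the statement is the Claim_ definition above) =====
theorem kemija08_spec : Claim_equal_kemija08 := by
  intro lines _ _
  unfold Spec_kemija08 kemija08 kemija08_alt
  cases h : PySem.List.pyGet? lines 0 with
  | none => rfl
  | some s => simp [kemija08_loop_eq]
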